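-- pv_equiv track=rewrite | github.com/SzymonIwaniuk/data_structures_and_algorithms | exams/2020_2021/egz1/zad1.py | chaos_index
-- ===== SOURCE A (Python) =====
-- def chaos_index(T):
--     indexed = list(enumerate(T))
--     indexed.sort(key=lambda x: x[1])
--
--     max_chaos = 0
--     for sorted_index, (original_index, value) in enumerate(indexed):
--         diff = abs(original_index - sorted_index)
--         max_chaos = max(max_chaos, diff)
--
--     return max_chaos
-- ===== SOURCE B (Python) =====
-- def chaos_index(T):
--     n = len(T)
--     best = 0
--     for i in range(n):
--         r = 0
--         for j in range(n):
--             if T[j] < T[i] or (T[j] == T[i] and j < i):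
--                 r += 1
--         d = abs(i - r)
--         if d > best:
--             best = d
--     return best
-- ===== Notes on version B (the rewrite author's own statement) =====
-- stated objective: alternative
-- what changed: B never sorts: it computes each element's stable-sort rank directly by counting, for each index i, the elements that precede it in stable order (T[j] < T[i], or equal value with j < i), and keeps the running max of |i - rank|.
import Mathlib
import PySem

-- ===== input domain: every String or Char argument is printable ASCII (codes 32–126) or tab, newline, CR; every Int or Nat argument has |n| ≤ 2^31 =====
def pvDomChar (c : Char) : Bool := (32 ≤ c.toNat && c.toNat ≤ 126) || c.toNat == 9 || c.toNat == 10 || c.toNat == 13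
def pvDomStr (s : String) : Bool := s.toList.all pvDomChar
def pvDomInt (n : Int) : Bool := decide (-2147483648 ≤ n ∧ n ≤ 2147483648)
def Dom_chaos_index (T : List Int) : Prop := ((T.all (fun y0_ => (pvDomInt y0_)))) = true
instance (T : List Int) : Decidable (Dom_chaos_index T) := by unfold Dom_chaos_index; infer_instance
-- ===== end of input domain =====

-- B replaces A's sort entirely: it computes each element's stable-sort rank by counting the
-- elements that precede it in stable order and keeps a running max of |i - rank|
-- (objective: alternative algorithm — counting instead of sorting; not faster, O(n^2) vs O(n log n)).

-- ===== PORT A =====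
def chaos_index (T : List Int) : Int :=
  let indexed := PySem.List.enumerate T
  let sortedPairs := PySem.List.sorted indexed (fun x => x.2)
  (PySem.List.enumerate sortedPairs).foldl
    (fun max_chaos p => max max_chaos |p.2.1 - p.1|) 0

-- ===== PORT B =====
def chaos_index_alt (T : List Int) : Int :=
  let n : Int := PySem.List.len T
  (PySem.List.pyRange 0 n).foldl
    (fun best i =>
      -- i, j come from range(n), so the indexing T[j], T[i] is exact via pyGetD
      let r := (PySem.List.pyRange 0 n).foldl
        (fun r j =>
          if PySem.List.pyGetD T j 0 < PySem.List.pyGetD T i 0 ∨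
             (PySem.List.pyGetD T j 0 = PySem.List.pyGetD T i 0 ∧ j < i)
          then r + 1 else r) 0
      let d := |i - r|
      if d > best then d else best) 0

-- ===== PRECONDITION & SPEC =====
def Spec_chaos_index (T : List Int) (out : Int) : Prop := out = chaos_index_alt T
instance (T : List Int) (out : Int) : Decidable (Spec_chaos_index T out) := by unfold Spec_chaos_index; infer_instance

-- ===== CLAIM (what is proved, stated in full; the proofs are below) =====
def Claim_equal_chaos_index : Prop := ∀ (T : List Int), Dom_chaos_index T → Spec_chaos_index T (chaos_index T)

-- ===== LEMMAS AND PROOFS =====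

-- the strict 'precedes in stable order' relation on (original index, value) pairs
def pvLex (p q : Int × Int) : Prop := p.2 < q.2 ∨ (p.2 = q.2 ∧ p.1 < q.1)

-- its Boolean form, for countP (no extra instance declaration)
def pvLexb (p q : Int × Int) : Bool :=
  decide (p.2 < q.2 ∨ (p.2 = q.2 ∧ p.1 < q.1))

theorem pvLexb_iff (p q : Int × Int) : pvLexb p q = true ↔ pvLex p q := by
  simp [pvLexb, pvLex]

-- number of pairs of enumerate T that strictly precede q in stable order
def pvCnt (T : List Int) (q : Int × Int) : Int :=
  ((PySem.List.enumerate T).countP (fun p => pvLexb p q) : Int)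

-- inserting a pair whose index exceeds all indices in a pvLex-sorted list keeps it pvLex-sorted
theorem pv_insertBy_pairwise (x : Int × Int) (acc : List (Int × Int))
    (hacc : acc.Pairwise pvLex) (hlt : ∀ y ∈ acc, y.1 < x.1) :
    (PySem.List.insertBy (fun a b => decide (a.2 < b.2)) x acc).Pairwise pvLex := by
  induction acc with
  | nil => simp [PySem.List.insertBy]
  | cons y ys ih =>
    rw [List.pairwise_cons] at hacc
    simp only [PySem.List.insertBy]
    split_ifs with h
    · -- x goes first: pvLex x y and pvLex x z for z ∈ ys
      simp only [decide_eq_true_eq] at h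
      refine List.pairwise_cons.mpr ⟨?_, List.pairwise_cons.mpr hacc⟩
      intro z hz
      rcases List.mem_cons.mp hz with rfl | hz
      · exact Or.inl h
      · rcases hacc.1 z hz with h2 | h2
        · exact Or.inl (lt_trans h h2)
        · exact Or.inl (h2.1 ▸ h)
    · -- y stays first
      simp only [decide_eq_true_eq, not_lt] at h
      refine List.pairwise_cons.mpr ⟨?_, ih hacc.2 (fun z hz => hlt z (List.mem_cons_of_mem _ hz))⟩
      intro z hz
      rcases (PySem.List.mem_insertBy _ x z ys).mp hz with rfl | hz
      · rcases lt_or_eq_of_le h with h2 | h2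
        · exact Or.inl h2
        · exact Or.inr ⟨h2, hlt y List.mem_cons_self⟩
      · exact hacc.1 z hz

-- the insertion-sort fold over pairs with strictly increasing indices is pvLex-sorted throughout
theorem pv_foldl_insertBy_pairwise (xs acc : List (Int × Int))
    (hacc : acc.Pairwise pvLex)
    (hsep : ∀ y ∈ acc, ∀ x ∈ xs, y.1 < x.1)
    (hxs : xs.Pairwise (fun a b => a.1 < b.1)) :
    (xs.foldl (fun acc x => PySem.List.insertBy (fun a b => decide (a.2 < b.2)) x acc) acc).Pairwise pvLex := by
  induction xs generalizing acc with
  | nil => exact hacc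
  | cons x xs ih =>
    rw [List.pairwise_cons] at hxs
    refine ih _ (pv_insertBy_pairwise x acc hacc (fun y hy => hsep y hy x List.mem_cons_self))
      ?_ hxs.2
    intro y hy z hz
    rcases (PySem.List.mem_insertBy _ x y acc).mp hy with rfl | hy
    · exact hxs.1 z hz
    · exact hsep y hy z (List.mem_cons_of_mem _ hz)

-- A's stably sorted pair list is pairwise pvLex
theorem pv_sorted_pairwise_lex (T : List Int) :
    (PySem.List.sorted (PySem.List.enumerate T) (fun x => x.2)).Pairwise pvLex := by
  rw [PySem.List.sorted_eq_foldl_insertBy]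
  refine pv_foldl_insertBy_pairwise _ [] (by simp) (by simp) ?_
  rw [List.pairwise_iff_getElem]
  intro i j hi hj hij
  rw [PySem.List.length_enumerate] at hi hj
  rw [PySem.List.getElem_enumerate T 0 i (by simpa [PySem.List.length_enumerate]),
      PySem.List.getElem_enumerate T 0 j (by simpa [PySem.List.length_enumerate])]
  simp; omega

-- in a pairwise-pvLex list, the number of elements preceding L[s] in stable order is s
theorem pv_countP_pos (L : List (Int × Int)) (hL : L.Pairwise pvLex) (s : Nat)
    (hs : s < L.length) (q : Int × Int) (hq : q = L[s]) :
    L.countP (fun y => pvLexb y q) = s := by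
  rw [List.pairwise_iff_getElem] at hL
  rw [← List.take_append_drop s L, List.countP_append]
  have hts : (L.take s).length = s := List.length_take_of_le (le_of_lt hs)
  have h1 : (L.take s).countP (fun y => pvLexb y q) = s := by
    rw [List.countP_eq_length.mpr, hts]
    intro y hy
    obtain ⟨k, hk, rfl⟩ := List.getElem_of_mem hy
    rw [List.getElem_take]
    exact (pvLexb_iff _ _).mpr (hq ▸ hL k s _ hs (by omega))
  have h2 : (L.drop s).countP (fun y => pvLexb y q) = 0 := by
    rw [List.countP_eq_zero]
    intro y hy
    obtain ⟨k, hk, rfl⟩ := List.getElem_of_mem hy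
    rw [List.getElem_drop]
    simp only [pvLexb_iff]
    rw [List.length_drop] at hk
    rcases Nat.eq_or_lt_of_le (Nat.le_add_right s k) with h | h
    · -- y = L[s]: pvLex is irreflexive
      intro hcon
      have hk0 : k = 0 := by omega
      subst hk0
      have he : L[s + 0] = q := by simpa using hq.symm
      rw [he] at hcon
      unfold pvLex at hcon; omega
    · -- L[s] precedes y: pvLex is asymmetric
      intro hcon
      have hlex := hL s (s + k) hs (by omega) h
      rw [← hq] at hlex
      unfold pvLex at hcon hlex; omega
  rw [h1, h2]
  omega

-- at each sorted position s, A's displacement |orig - s| is |orig - pvCnt T (pair)|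
theorem pv_cnt_at_sorted (T : List Int) (s : Nat)
    (hs : s < (PySem.List.sorted (PySem.List.enumerate T) (fun x => x.2)).length) :
    pvCnt T (PySem.List.sorted (PySem.List.enumerate T) (fun x => x.2))[s] = (s : Int) := by
  unfold pvCnt
  rw [((PySem.List.sorted_perm (PySem.List.enumerate T) (fun x => x.2) false).countP_eq _).symm,
      pv_countP_pos _ (pv_sorted_pairwise_lex T) s hs _ rfl]

-- ===== VERDICT (by name: the statement is the Claim_ definition above) =====
theorem chaos_index_spec : Claim_equal_chaos_index := by
  intro T _
  unfold Spec_chaos_index chaos_index chaos_index_alt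
  simp only []
  set L := PySem.List.sorted (PySem.List.enumerate T) (fun x => x.2) with hLdef
  set h : Int × Int → Int := fun q => |q.1 - pvCnt T q| with hh
  -- A's loop is the running max over the displacement list of the sorted pass
  have hA : (PySem.List.enumerate L).foldl (fun m p => max m |p.2.1 - p.1|) 0
      = (L.map h).foldl max 0 := by
    rw [← List.foldl_map]
    congr 1
    apply List.ext_getElem
    · simp [PySem.List.length_enumerate]
    · intro s h1 h2
      have hs : s < L.length := by simpa [PySem.List.length_enumerate] using h1
      rw [List.getElem_map, List.getElem_map, PySem.List.getElem_enumerate L 0 s (by simpa [PySem.List.length_enumerate])]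
      simp only [hh]
      rw [pv_cnt_at_sorted T s hs]
      simp
  rw [hA]
  -- B's loop is the running max over the displacement list in original order
  have hB : (PySem.List.pyRange 0 (PySem.List.len T)).foldl
      (fun best i =>
        let r := (PySem.List.pyRange 0 (PySem.List.len T)).foldl
          (fun r j =>
            if PySem.List.pyGetD T j 0 < PySem.List.pyGetD T i 0 ∨
               (PySem.List.pyGetD T j 0 = PySem.List.pyGetD T i 0 ∧ j < i)
            then r + 1 else r) 0
        let d := |i - r|
        if d > best then d else best) 0
      = ((PySem.List.enumerate T).map h).foldl max 0 := by
    rw [PySem.List.enumerate_eq_map_pyRange T 0, List.map_map, List.foldl_map]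
    congr 1
    funext best i
    have hr : (PySem.List.pyRange 0 (PySem.List.len T)).foldl
        (fun r j =>
          if PySem.List.pyGetD T j 0 < PySem.List.pyGetD T i 0 ∨
             (PySem.List.pyGetD T j 0 = PySem.List.pyGetD T i 0 ∧ j < i)
          then r + 1 else r) 0
        = pvCnt T (i, PySem.List.pyGetD T i 0) := by
      unfold pvCnt
      rw [PySem.List.enumerate_eq_map_pyRange T 0, List.countP_map]
      have := PySem.List.foldl_count_if
        (fun j => pvLexb (j, PySem.List.pyGetD T j 0) (i, PySem.List.pyGetD T i 0))
        (PySem.List.pyRange 0 (PySem.List.len T)) 0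
      simpa [pvLexb, Function.comp] using this
    simp only [hr, hh, Function.comp]
    rw [max_def]
    split_ifs <;> omega
  rw [hB]
  -- the two displacement lists are permutations of each other; foldl max is invariant
  exact ((PySem.List.sorted_perm (PySem.List.enumerate T) (fun x => x.2) false).map h).foldl_eq 0
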